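-- pv_equiv track=rewrite | github.com/pedrohbb/studies | python/usp_introducao_ciencia_computacao_com_python_parte_1/nim_temporizado.py | computador_escolhe_jogada
-- ===== SOURCE A (Python) =====
-- def computador_escolhe_jogada(n,m):
--     for i in range(1,m+1):
--         x = i
--         if ((n-x) % (m+1)) == 0:
--             break
--         else:
--             continue
--     return x
-- ===== SOURCE B (Python) =====
-- def computador_escolhe_jogada(n, m):
--     r = n % (m + 1)
--     return r if r >= 1 else m
-- ===== Notes on version B (the rewrite author's own statement) =====
-- stated objective: faster
-- what changed: Replaces the linear scan over 1..m looking for i with (n-i) % (m+1) == 0 by the closed form r = n % (m+1), returning r when r >= 1 and m otherwise.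
import Mathlib
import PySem

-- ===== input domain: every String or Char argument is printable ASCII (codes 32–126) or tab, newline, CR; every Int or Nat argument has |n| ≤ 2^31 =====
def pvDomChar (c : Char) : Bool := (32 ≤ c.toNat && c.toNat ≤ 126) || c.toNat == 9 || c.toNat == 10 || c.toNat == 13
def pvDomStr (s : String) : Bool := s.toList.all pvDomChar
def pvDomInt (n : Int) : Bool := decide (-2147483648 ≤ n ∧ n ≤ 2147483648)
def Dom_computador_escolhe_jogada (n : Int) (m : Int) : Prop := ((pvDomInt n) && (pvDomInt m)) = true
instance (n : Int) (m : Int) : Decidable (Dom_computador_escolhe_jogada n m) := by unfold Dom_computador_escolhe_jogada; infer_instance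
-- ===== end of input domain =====

-- B replaces A's linear scan over 1..m by the closed form n % (m+1) (faster: O(1) vs O(m)).


-- ===== PORT A =====
-- the for-loop with break/continue: fuel counts the remaining iterations of range(1, m+1)
-- (generated lazily, like Python's range); x is the loop variable carried across iterations
def pvALoop (n : Int) (m : Int) : Nat → Int → Int → Int
  | 0, _, x => x
  | k + 1, i, _ => if PySem.Int.mod (n - i) (m + 1) = 0 then i else pvALoop n m k (i + 1) i

def computador_escolhe_jogada (n : Int) (m : Int) : Int :=
  pvALoop n m m.toNat 1 0

-- ===== PORT B =====
def computador_escolhe_jogada_alt (n : Int) (m : Int) : Int :=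
  let r := PySem.Int.mod n (m + 1)
  if 1 ≤ r then r else m

-- ===== PRECONDITION & SPEC =====
-- A raises (UnboundLocalError: x never bound by the empty range) whenever m < 1.
def Pre_computador_escolhe_jogada (n : Int) (m : Int) : Prop := 1 ≤ m
instance (n : Int) (m : Int) : Decidable (Pre_computador_escolhe_jogada n m) := by unfold Pre_computador_escolhe_jogada; infer_instance
def pvWitness_computador_escolhe_jogada : Int × Int := (5, 3)

def Spec_computador_escolhe_jogada (n : Int) (m : Int) (out : Int) : Prop := out = computador_escolhe_jogada_alt n m
instance (n : Int) (m : Int) (out : Int) : Decidable (Spec_computador_escolhe_jogada n m out) := by unfold Spec_computador_escolhe_jogada; infer_instance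

-- ===== CLAIM (what is proved, stated in full; the proofs are below) =====
def Claim_equal_computador_escolhe_jogada : Prop := ∀ (n : Int) (m : Int), Dom_computador_escolhe_jogada n m → Pre_computador_escolhe_jogada n m → Spec_computador_escolhe_jogada n m (computador_escolhe_jogada n m)

-- ===== LEMMAS AND PROOFS =====

-- divisibility test in the loop ↔ the candidate equals n % (m+1), for candidates in [0, m+1)
lemma pvHit_iff (n m a : Int) (hm : 1 ≤ m) (h0 : 0 ≤ a) (h1 : a < m + 1) :
    PySem.Int.mod (n - a) (m + 1) = 0 ↔ PySem.Int.mod n (m + 1) = a := by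
  rw [PySem.Int.mod_eq_zero_iff_dvd, PySem.Int.mod_eq_emod_of_pos (by omega : (0:Int) < m + 1)]
  constructor
  · intro h
    have := Int.emod_emod_of_dvd n (dvd_refl (m + 1))
    have hn : n % (m + 1) = a % (m + 1) := by
      rw [Int.emod_eq_emod_iff_emod_sub_eq_zero]
      exact Int.emod_eq_zero_of_dvd h
    rw [hn, Int.emod_eq_of_lt h0 h1]
  · intro h
    have : (n - a) % (m + 1) = 0 := by
      rw [Int.sub_emod, h, Int.emod_eq_of_lt h0 h1]
      simp
    exact Int.dvd_of_emod_eq_zero this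

-- the scan of the k+1 values a, a+1, …, m (with 1 ≤ a, a + k = m) returns n % (m+1) if it lies in [a, m], else m
lemma pvALoop_eq (k : Nat) : ∀ (n m a x : Int), 1 ≤ a → a + k = m →
    pvALoop n m (k + 1) a x =
      (if a ≤ PySem.Int.mod n (m + 1) then PySem.Int.mod n (m + 1) else m) := by
  induction k with
  | zero =>
    intro n m a x ha hk
    have ham : a = m := by omega
    subst ham
    have hlt : PySem.Int.mod n (a + 1) < a + 1 := PySem.Int.mod_lt n (by omega)
    by_cases h : PySem.Int.mod (n - a) (a + 1) = 0
    · have := (pvHit_iff n a a (by omega) (by omega) (by omega)).mp h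
      simp [pvALoop, h, this]
    · simp only [pvALoop, if_neg h]
      have hne : PySem.Int.mod n (a + 1) ≠ a := fun hc => h ((pvHit_iff n a a (by omega) (by omega) (by omega)).mpr hc)
      rw [if_neg (by omega)]
  | succ k ih =>
    intro n m a x ha hk
    have hstep : pvALoop n m (k + 1 + 1) a x =
        (if PySem.Int.mod (n - a) (m + 1) = 0 then a else pvALoop n m (k + 1) (a + 1) a) := rfl
    by_cases h : PySem.Int.mod (n - a) (m + 1) = 0
    · have hr := (pvHit_iff n m a (by omega) (by omega) (by omega)).mp h
      rw [hstep, if_pos h, if_pos (by omega), hr]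
    · have hne : PySem.Int.mod n (m + 1) ≠ a := fun hc => h ((pvHit_iff n m a (by omega) (by omega) (by omega)).mpr hc)
      rw [hstep, if_neg h, ih n m (a + 1) a (by omega) (by omega)]
      by_cases hle : a + 1 ≤ PySem.Int.mod n (m + 1)
      · rw [if_pos hle, if_pos (by omega)]
      · rw [if_neg hle, if_neg (by omega)]

-- ===== VERDICT (by name: the statement is the Claim_ definition above) =====
theorem computador_escolhe_jogada_spec : Claim_equal_computador_escolhe_jogada := by
  intro n m _ hpre
  unfold Pre_computador_escolhe_jogada at hpre
  unfold Spec_computador_escolhe_jogada computador_escolhe_jogada computador_escolhe_jogada_alt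
  have hfuel : m.toNat = (m - 1).toNat + 1 := by omega
  rw [hfuel, pvALoop_eq (m - 1).toNat n m 1 0 (by omega) (by omega)]
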